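-- pv_equiv track=rewrite | github.com/tbascoul/aoc2022 | day06/part1.py | compute
-- ===== SOURCE A (Python) =====
-- from collections import deque
--
-- def compute(s: str) -> int:
--     queue = deque([])
--     for i, c in enumerate(s):
--         if c in queue:
--             while queue:
--                 poped = queue.popleft()
--                 if poped == c:
--                     queue.append(c)
--                     break
--         else:
--             queue.append(c)
--             if len(queue) == 4:
--                 return i + 1
-- ===== SOURCE B (Python) =====
-- def compute(s: str) -> int:
--     for i in range(len(s) - 3):
--         if len(set(s[i:i+4])) == 4:
--             return i + 4
-- ===== Notes on version B (the rewrite author's own statement) =====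
-- stated objective: simpler
-- what changed: Replaced A's incremental deque-maintained sliding window (popping duplicates from the left) with a direct scan that tests every 4-character slice s[i:i+4] for distinctness via set(), returning i+4 at the first hit.
import Mathlib
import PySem

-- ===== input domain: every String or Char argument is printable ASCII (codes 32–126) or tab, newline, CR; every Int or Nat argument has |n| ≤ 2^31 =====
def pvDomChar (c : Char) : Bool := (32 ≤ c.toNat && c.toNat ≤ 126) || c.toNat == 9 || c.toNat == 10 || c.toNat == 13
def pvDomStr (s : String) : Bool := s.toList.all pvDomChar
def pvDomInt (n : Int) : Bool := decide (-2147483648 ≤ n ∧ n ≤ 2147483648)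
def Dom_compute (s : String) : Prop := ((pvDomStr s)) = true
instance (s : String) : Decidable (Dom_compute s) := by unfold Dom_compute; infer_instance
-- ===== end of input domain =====

-- B replaces A's deque-maintained sliding window with a plain fixed-window scan testing each 4-char slice for distinctness (objective: simpler).

-- ===== PORT A =====
-- inner 'while queue: poped = queue.popleft(); if poped == c: queue.append(c); break'
def computePop (q : List Char) (c : Char) : List Char :=
  match q with
  | [] => []
  | x :: rest => if x == c then rest ++ [c] else computePop rest c

def computeGo (i : Int) (q : List Char) (l : List Char) : Option Int :=
  match l with
  | [] => none
  | c :: rest =>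
    if q.contains c then
      computeGo (i + 1) (computePop q c) rest
    else
      let q' := q ++ [c]
      if q'.length == 4 then some (i + 1) else computeGo (i + 1) q' rest

def compute (s : String) : Option Int := computeGo 0 [] s.toList

-- ===== PORT B =====
-- 'for i in range(len(s) - 3): if len(set(s[i:i+4])) == 4: return i + 4'
def computeAltLoop (l : List Char) (r : List Int) : Option Int :=
  match r with
  | [] => none
  | i :: rs =>
    if (PySem.Set.ofList (PySem.List.slice l (some i) (some (i + 4)))).length == 4
    then some (i + 4) else computeAltLoop l rs

def compute_alt (s : String) : Option Int :=
  computeAltLoop s.toList (PySem.List.pyRange 0 ((s.toList.length : Int) - 3) 1)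

-- ===== PRECONDITION & SPEC =====
def Spec_compute (s : String) (out : Option Int) : Prop := out = compute_alt s
instance (s : String) (out : Option Int) : Decidable (Spec_compute s out) := by unfold Spec_compute; infer_instance

-- ===== CLAIM (what is proved, stated in full; the proofs are below) =====
def Claim_equal_compute : Prop := ∀ (s : String), Dom_compute s → Spec_compute s (compute s)

-- ===== LEMMAS AND PROOFS =====
def win (a b c d : Char) : Bool := (PySem.Set.ofList [a, b, c, d]).length == 4

lemma win_iff (a b c d : Char) :
    win a b c d = true ↔ (a ≠ b ∧ a ≠ c ∧ a ≠ d ∧ b ≠ c ∧ b ≠ d ∧ c ≠ d) := by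
  simp [win, PySem.Set.ofList, PySem.Set.add]
  split_ifs <;> simp_all [eq_comm] <;> tauto

def aux (j : Int) : List Char → Option Int
  | a :: b :: c :: d :: rest =>
    if win a b c d then some (j + 4) else aux (j + 1) (b :: c :: d :: rest)
  | _ => none

lemma aux_short (j : Int) (t : List Char) (h : t.length ≤ 3) : aux j t = none := by
  match t with
  | [] => rfl
  | [_] => rfl
  | [_, _] => rfl
  | [_, _, _] => rfl
  | _ :: _ :: _ :: _ :: _ => simp at h; omega

lemma bridge_fuel (n : Nat) : ∀ (l : List Char) (k : Nat), l.length - k ≤ n →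
    computeAltLoop l (PySem.List.pyRange (k : Int) ((l.length : Int) - 3) 1) = aux (k : Int) (l.drop k) := by
  induction n with
  | zero =>
    intro l k h
    rw [PySem.List.pyRange_one_eq_nil (by omega)]
    rw [aux_short _ _ (by simp; omega)]
    rfl
  | succ n ih =>
    intro l k h
    by_cases hk : (k : Int) < (l.length : Int) - 3
    · rw [PySem.List.pyRange_one_cons hk]
      have hslice : PySem.List.slice l (some (k : Int)) (some ((k : Int) + 4)) = (l.drop k).take 4 := by
        have h4 : ((k : Int) + 4) = ((k : Int) + ((4 : Nat) : Int)) := by norm_num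
        rw [h4, PySem.List.slice_natCast_add]
      have hlen : 4 ≤ (l.drop k).length := by simp; omega
      rcases hdk : l.drop k with _ | ⟨a, _ | ⟨b, _ | ⟨c, _ | ⟨d, rest⟩⟩⟩⟩ <;>
        rw [hdk] at hlen <;> simp at hlen
      have hnext : l.drop (k + 1) = b :: c :: d :: rest := by
        have : l.drop (k + 1) = (l.drop k).drop 1 := by
          rw [List.drop_drop]
        rw [this, hdk]; rfl
      have ihk := ih l (k + 1) (by omega)
      rw [hnext] at ihk
      push_cast at ihk
      show computeAltLoop l ((k : Int) :: PySem.List.pyRange ((k : Int) + 1) ((l.length : Int) - 3) 1) = _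
      rw [computeAltLoop, hslice, hdk]
      simp only [List.take_succ_cons, List.take_zero]
      simp only [show ((PySem.Set.ofList [a, b, c, d]).length == 4) = win a b c d from rfl]
      rw [aux]
      by_cases hw : win a b c d = true
      · simp [hw]
      · simp only [hw, Bool.false_eq_true, if_false]
        exact ihk
    · rw [PySem.List.pyRange_one_eq_nil (by omega)]
      rw [aux_short _ _ (by simp; omega)]
      rfl

lemma main_lemma (rest : List Char) : ∀ (q : List Char) (i : Int), q.Nodup → q.length ≤ 3 →
    computeGo i q rest = aux (i - q.length) (q ++ rest) := by
  induction rest with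
  | nil =>
    intro q i hn hl
    rw [List.append_nil, aux_short _ _ hl]
    rfl
  | cons c rest' ih =>
    intro q i hn hl
    by_cases hc : q.contains c = true
    · have hmem : c ∈ q := by simpa using hc
      rcases q with _ | ⟨a, _ | ⟨b, _ | ⟨d0, _ | ⟨e, q4⟩⟩⟩⟩
      · simp at hmem
      · -- q = [a] with a = c
        have ha : c = a := by simpa [eq_comm] using hmem
        subst ha
        have e : computePop [c] c = [c] := by simp [computePop]
        rw [computeGo, if_pos hc, e, ih [c] (i+1) (by simp) (by simp)]
        rcases rest' with _ | ⟨x, _ | ⟨y, r2⟩⟩ <;>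
          simp [aux, win_iff] <;> ring_nf
      · -- q = [a, b]
        have hab : a ≠ b := by simp at hn; tauto
        simp at hmem
        rcases hmem with ha | hb
        · subst ha
          -- q = [c, b]
          have e : computePop [c, b] c = [b, c] := by simp [computePop]
          rw [computeGo, if_pos hc, e, ih [b, c] (i+1) (by simp [Ne.symm hab]) (by simp)]
          rcases rest' with _ | ⟨x, r2⟩ <;>
            simp [aux, win_iff] <;> ring_nf
        · subst hb
          -- q = [a, c]
          have e : computePop [a, c] c = [c] := by simp [computePop, hab]
          rw [computeGo, if_pos hc, e, ih [c] (i+1) (by simp) (by simp)]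
          rcases rest' with _ | ⟨x, _ | ⟨y, r2⟩⟩ <;>
            simp [aux, win_iff, hab] <;> ring_nf
      · -- q = [a, b, d0]
        have hns : a ≠ b ∧ a ≠ d0 ∧ b ≠ d0 := by simp at hn; tauto
        obtain ⟨hab, had, hbd⟩ := hns
        simp at hmem
        rcases hmem with ha | hb | hd
        · subst ha
          -- q = [c, b, d0]
          have e : computePop [c, b, d0] c = [b, d0, c] := by simp [computePop]
          rw [computeGo, if_pos hc, e,
            ih [b, d0, c] (i+1) (by simp [Ne.symm hab, Ne.symm had, hbd]) (by simp)]
          simp [aux, win_iff] <;> ring_nf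
        · subst hb
          -- q = [a, c, d0]
          have e : computePop [a, c, d0] c = [d0, c] := by simp [computePop, hab]
          rw [computeGo, if_pos hc, e, ih [d0, c] (i+1) (by simp [Ne.symm hbd]) (by simp)]
          rcases rest' with _ | ⟨x, r2⟩ <;>
            simp [aux, win_iff, hab] <;> ring_nf
        · subst hd
          -- q = [a, b, c]
          have e : computePop [a, b, c] c = [c] := by simp [computePop, had, hbd]
          rw [computeGo, if_pos hc, e, ih [c] (i+1) (by simp) (by simp)]
          rcases rest' with _ | ⟨x, _ | ⟨y, r2⟩⟩ <;>
            simp [aux, win_iff, had, hbd] <;> ring_nf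
      · simp at hl; omega
    · have hnm : c ∉ q := by simpa using hc
      by_cases h3 : q.length = 3
      · rcases q with _ | ⟨a, _ | ⟨b, _ | ⟨d0, _ | ⟨e, q4⟩⟩⟩⟩
        · simp at h3
        · simp at h3
        · simp at h3
        · -- q = [a, b, d0], c fresh: the window closes here
          have hns : a ≠ b ∧ a ≠ d0 ∧ b ≠ d0 := by simp at hn; tauto
          simp at hnm
          have hw : win a b d0 c = true := by
            rw [win_iff]
            refine ⟨hns.1, hns.2.1, fun h => hnm.1 h.symm, hns.2.2,
              fun h => hnm.2.1 h.symm, fun h => hnm.2.2 h.symm⟩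
          rw [computeGo, if_neg hc]
          rw [show ([a, b, d0] ++ c :: rest' : List Char) = a :: b :: d0 :: c :: rest' from rfl,
            aux, if_pos hw]
          simp
          omega
        · simp at hl; omega
      · have hl2 : q.length ≤ 2 := by omega
        rw [computeGo, if_neg hc]
        have h4 : ((q ++ [c]).length == 4) = false := by simp; omega
        simp only [h4, Bool.false_eq_true, if_false]
        rw [ih (q ++ [c]) (i+1)
          (by simp [List.nodup_append, hn]; exact fun x hx h => hnm (h ▸ hx)) (by simp; omega)]
        rw [List.append_assoc]
        congr 1
        simp

-- ===== VERDICT (by name: the statement is the Claim_ definition above) =====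
theorem compute_spec : Claim_equal_compute := by
  intro s _
  unfold Spec_compute compute compute_alt
  have hb := bridge_fuel s.toList.length s.toList 0 (by omega)
  have hm := main_lemma s.toList [] 0 List.nodup_nil (by simp)
  norm_num at hb hm
  rw [hm, ← hb]
  simp
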